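-- pv_equiv track=rewrite | github.com/piter-a/K-means-K-medians-algorithm | K-means, K-medians algorithms.py | FP_TN
-- ===== SOURCE A (Python) =====
-- def FP_TN(a_pos, c_pos, f_pos, v_pos):
--      # True Negatives
--     TN = 0
--     # False Positives
--     FP = 0
--     #animals
--     for i in range(len(a_pos)):
--         for j in range(len(c_pos)):
--             # If i =j then add 1 to FP
--             if(a_pos[i] == c_pos[j]):
--                 FP += 1
--                 # else add 1 to TN
--             else:
--                     TN += 1
--         #fruit
--         for j in range(len(f_pos)):
--             if(a_pos[i]==f_pos[j]):
--                 FP += 1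
--             else:
--                     TN += 1
--         #veggies
--         for j in range(len(v_pos)):
--             if(a_pos[i] == v_pos[j]):
--                 FP += 1
--             else:
--                 TN += 1
--     #countries
--     for i in range(len(c_pos)):
--         for j in range(len(f_pos)):
--             if(c_pos[i] == f_pos[j]):
--                 FP += 1
--             else:
--                  TN += 1
--
--         for j in range(len(v_pos)):
--             if(c_pos[i] == v_pos[j]):
--                 FP += 1
--             else:
--                 TN += 1
--     #fruits
--     for i in range(len(f_pos)):
--         for j in range(len(v_pos)):
--             if(f_pos[i] == v_pos[j]):
--                 FP += 1
--             else:
--                 TN += 1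
--     return FP, TN
-- ===== SOURCE B (Python) =====
-- def FP_TN(a_pos, c_pos, f_pos, v_pos):
--     def counter(xs):
--         c = {}
--         for x in xs:
--             c[x] = c.get(x, 0) + 1
--         return c
--
--     def cross(cx, cy):
--         return sum(n * cy.get(v, 0) for v, n in cx.items())
--
--     ca, cc, cf, cv = counter(a_pos), counter(c_pos), counter(f_pos), counter(v_pos)
--     FP = (cross(ca, cc) + cross(ca, cf) + cross(ca, cv)
--           + cross(cc, cf) + cross(cc, cv) + cross(cf, cv))
--     total = (len(a_pos) * (len(c_pos) + len(f_pos) + len(v_pos))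
--              + len(c_pos) * (len(f_pos) + len(v_pos))
--              + len(f_pos) * len(v_pos))
--     return FP, total - FP
-- ===== Notes on version B (the rewrite author's own statement) =====
-- stated objective: faster
-- what changed: Replaces the six nested pairwise-comparison loops by hash-map value counters built in one pass per list: FP is the sum of products of per-value counts across the six group pairs and TN is total cross pairs minus FP.
import Mathlib
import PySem

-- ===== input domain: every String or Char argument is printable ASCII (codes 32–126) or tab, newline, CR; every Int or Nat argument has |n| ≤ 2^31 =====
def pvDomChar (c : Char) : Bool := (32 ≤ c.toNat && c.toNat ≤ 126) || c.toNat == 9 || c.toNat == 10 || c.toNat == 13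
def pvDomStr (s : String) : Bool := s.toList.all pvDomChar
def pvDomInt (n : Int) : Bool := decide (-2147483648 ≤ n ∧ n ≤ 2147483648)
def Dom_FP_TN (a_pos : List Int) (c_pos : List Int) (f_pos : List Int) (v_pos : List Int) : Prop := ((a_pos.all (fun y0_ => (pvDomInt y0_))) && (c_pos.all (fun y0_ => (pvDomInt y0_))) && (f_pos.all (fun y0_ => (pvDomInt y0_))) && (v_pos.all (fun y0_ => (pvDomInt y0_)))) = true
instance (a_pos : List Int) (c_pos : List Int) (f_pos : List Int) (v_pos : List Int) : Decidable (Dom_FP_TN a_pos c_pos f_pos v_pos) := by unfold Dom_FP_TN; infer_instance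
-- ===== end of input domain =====

-- B replaces A's six nested pairwise-comparison loops by one-pass per-list value
-- counters: FP = sum of products of per-value counts over the six group pairs,
-- TN = total cross pairs - FP (objective: faster, measured).

-- ===== PORT A =====
-- one inner 'for j in range(len(Y)): if x == Y[j]: FP += 1 else: TN += 1' pass; state p = (FP, TN)
def pvInner (x : Int) (Y : List Int) (p : Int × Int) : Int × Int :=
  (PySem.List.pyRange 0 (PySem.List.len Y) 1).foldl
    (fun p j => if x = PySem.List.pyGetD Y j 0 then (p.1 + 1, p.2) else (p.1, p.2 + 1)) p

def FP_TN (a_pos : List Int) (c_pos : List Int) (f_pos : List Int) (v_pos : List Int) : Int × Int :=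
  let s0 : Int × Int := (0, 0)
  -- animals
  let s1 := (PySem.List.pyRange 0 (PySem.List.len a_pos) 1).foldl
    (fun p i =>
      let p := pvInner (PySem.List.pyGetD a_pos i 0) c_pos p
      let p := pvInner (PySem.List.pyGetD a_pos i 0) f_pos p
      pvInner (PySem.List.pyGetD a_pos i 0) v_pos p) s0
  -- countries
  let s2 := (PySem.List.pyRange 0 (PySem.List.len c_pos) 1).foldl
    (fun p i =>
      let p := pvInner (PySem.List.pyGetD c_pos i 0) f_pos p
      pvInner (PySem.List.pyGetD c_pos i 0) v_pos p) s1
  -- fruits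
  let s3 := (PySem.List.pyRange 0 (PySem.List.len f_pos) 1).foldl
    (fun p i => pvInner (PySem.List.pyGetD f_pos i 0) v_pos p) s2
  s3

-- ===== PORT B =====
-- c = {}; for x in xs: c[x] = c.get(x, 0) + 1
def pvCounter (xs : List Int) : PySem.Dict Int Int :=
  xs.foldl (fun d x => d.insert x (d.getD x 0 + 1)) PySem.Dict.empty

-- sum(n * cy.get(v, 0) for v, n in cx.items())
def pvCross (cx cy : PySem.Dict Int Int) : Int :=
  ((cx.items).map (fun p => p.2 * cy.getD p.1 0)).sum

def FP_TN_alt (a_pos : List Int) (c_pos : List Int) (f_pos : List Int) (v_pos : List Int) : Int × Int :=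
  let ca := pvCounter a_pos
  let cc := pvCounter c_pos
  let cf := pvCounter f_pos
  let cv := pvCounter v_pos
  let FP := pvCross ca cc + pvCross ca cf + pvCross ca cv
            + pvCross cc cf + pvCross cc cv + pvCross cf cv
  let total := PySem.List.len a_pos * (PySem.List.len c_pos + PySem.List.len f_pos + PySem.List.len v_pos)
               + PySem.List.len c_pos * (PySem.List.len f_pos + PySem.List.len v_pos)
               + PySem.List.len f_pos * PySem.List.len v_pos
  (FP, total - FP)

-- ===== PRECONDITION & SPEC =====
def Spec_FP_TN (a_pos : List Int) (c_pos : List Int) (f_pos : List Int) (v_pos : List Int) (out : Int × Int) : Prop := out = FP_TN_alt a_pos c_pos f_pos v_pos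
instance (a_pos : List Int) (c_pos : List Int) (f_pos : List Int) (v_pos : List Int) (out : Int × Int) : Decidable (Spec_FP_TN a_pos c_pos f_pos v_pos out) := by unfold Spec_FP_TN; infer_instance

-- ===== CLAIM (what is proved, stated in full; the proofs are below) =====
def Claim_equal_FP_TN : Prop := ∀ (a_pos : List Int) (c_pos : List Int) (f_pos : List Int) (v_pos : List Int), Dom_FP_TN a_pos c_pos f_pos v_pos → Spec_FP_TN a_pos c_pos f_pos v_pos (FP_TN a_pos c_pos f_pos v_pos)

-- ===== LEMMAS AND PROOFS =====

-- number of elements of Y equal to x, as an Int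
def pvCnt (x : Int) (Y : List Int) : Int := (Y.count x : Int)

lemma pvInner_eq (x : Int) (Y : List Int) (p : Int × Int) :
    pvInner x Y p = (p.1 + pvCnt x Y, p.2 + ((Y.length : Int) - pvCnt x Y)) := by
  unfold pvInner
  rw [PySem.List.foldl_pyRange_zero_pyGetD Y 0
        (fun p y => if x = y then (p.1 + 1, p.2) else (p.1, p.2 + 1)) p]
  induction Y generalizing p with
  | nil => simp [pvCnt]
  | cons y Y ih =>
      simp only [List.foldl_cons]
      by_cases h : x = y
      · rw [if_pos h, ih]
        simp only [Prod.mk.injEq, pvCnt, h, List.count_cons, List.length_cons]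
        constructor <;> push_cast <;> simp <;> omega
      · rw [if_neg h, ih]
        have hne : ¬ ((y == x) = true) := by
          simp only [beq_iff_eq]
          exact fun hh => h hh.symm
        simp only [Prod.mk.injEq, pvCnt, List.count_cons, List.length_cons, hne]
        constructor <;> push_cast <;> simp <;> omega

lemma pvFoldl_pair_add (g h : Int → Int) (X : List Int) (p : Int × Int) :
    X.foldl (fun p x => (p.1 + g x, p.2 + h x)) p
      = (p.1 + (X.map g).sum, p.2 + (X.map h).sum) := by
  induction X generalizing p with
  | nil => simp
  | cons x X ih =>
      simp only [List.foldl_cons, List.map_cons, List.sum_cons, ih, Prod.mk.injEq]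
      constructor <;> ring

lemma pvSum_map_sub (f h : Int → Int) (X : List Int) :
    (X.map (fun x => f x - h x)).sum = (X.map f).sum - (X.map h).sum := by
  induction X with
  | nil => simp
  | cons x X ih => simp [ih]; ring

-- indicator sum over a nodup list containing x
lemma pvSum_map_add (f h : Int → Int) (X : List Int) :
    (X.map (fun x => f x + h x)).sum = (X.map f).sum + (X.map h).sum := by
  induction X with
  | nil => simp
  | cons x X ih => simp [ih]; ring

-- indicator sum over a nodup list containing x
lemma pvSum_indicator (g : Int → Int) (x : Int) (L : List Int)
    (hnd : L.Nodup) (hx : x ∈ L) :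
    (L.map (fun k => if x = k then g k else 0)).sum = g x := by
  induction L with
  | nil => simp at hx
  | cons y L ih =>
      rcases List.nodup_cons.mp hnd with ⟨hy, hnd'⟩
      simp only [List.map_cons, List.sum_cons]
      by_cases h : x = y
      · subst h
        rw [if_pos rfl]
        have hz : (L.map (fun k => if x = k then g k else 0)).sum = 0 := by
          apply List.sum_eq_zero
          intro a ha
          rcases List.mem_map.mp ha with ⟨k, hk, rfl⟩
          rw [if_neg]
          rintro rfl
          exact hy hk
        rw [hz]
        ring
      · rw [if_neg h]
        have hx' : x ∈ L := by
          rcases List.mem_cons.mp hx with h' | h'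
          · exact absurd h' h
          · exact h'
        rw [ih hnd' hx']
        ring

-- Σ_{k ∈ L} count_X(k) * g(k) = Σ_{x ∈ X} g(x), for L nodup ⊇ X
lemma pvSum_count_mul (g : Int → Int) (X L : List Int)
    (hnd : L.Nodup) (hsub : ∀ x ∈ X, x ∈ L) :
    (L.map (fun k => (X.count k : Int) * g k)).sum = (X.map g).sum := by
  induction X with
  | nil => simp
  | cons x X ih =>
      have hx : x ∈ L := hsub x (List.mem_cons_self ..)
      have hsub' : ∀ y ∈ X, y ∈ L := fun y hy => hsub y (List.mem_cons_of_mem _ hy)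
      have hsplit : ∀ k : Int,
          ((List.count k (x :: X) : Int)) * g k
            = (X.count k : Int) * g k + (if x = k then g k else 0) := by
        intro k
        by_cases h : x = k
        · subst h
          simp [List.count_cons]
          ring
        · have hne : ¬ ((x == k) = true) := by simpa using h
          simp [List.count_cons, hne, h]
      calc (L.map (fun k => ((x :: X).count k : Int) * g k)).sum
          = (L.map (fun k => (X.count k : Int) * g k + (if x = k then g k else 0))).sum := by
            apply congrArg
            exact List.map_congr_left (fun k _ => hsplit k)
        _ = (L.map (fun k => (X.count k : Int) * g k)).sum
              + (L.map (fun k => if x = k then g k else 0)).sum := by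
            rw [← pvSum_map_add]
        _ = (X.map g).sum + g x := by rw [ih hsub', pvSum_indicator g x L hnd hx]
        _ = ((x :: X).map g).sum := by
            simp only [List.map_cons, List.sum_cons]
            ring

-- cross of two counters = Σ_{x ∈ X} (count of x in Y)
lemma pvCross_counter (X Y : List Int) :
    pvCross (pvCounter X) (pvCounter Y) = (X.map (fun x => pvCnt x Y)).sum := by
  have hc : pvCounter X = PySem.Dict.counter X :=
    PySem.Dict.foldl_insert_getD_add_one_eq_counter X
  have hcY : pvCounter Y = PySem.Dict.counter Y :=
    PySem.Dict.foldl_insert_getD_add_one_eq_counter Y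
  unfold pvCross
  rw [hc, hcY, PySem.Dict.items_counter]
  simp only [List.map_map, Function.comp_def, PySem.Dict.getD_counter]
  have := pvSum_count_mul (fun k => (Y.count k : Int)) X (PySem.Set.ofList X)
    (PySem.Set.nodup_ofList X) (fun x hx => (PySem.Set.mem_ofList X x).mpr hx)
  simpa [pvCnt, mul_comm] using this

-- ===== VERDICT (by name: the statement is the Claim_ definition above) =====
theorem FP_TN_spec : Claim_equal_FP_TN := by
  intro a c f v _
  unfold Spec_FP_TN FP_TN FP_TN_alt
  dsimp only
  -- rewrite A's three outer loops over index ranges into folds over the lists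
  rw [PySem.List.foldl_pyRange_zero_pyGetD a 0
        (fun p x => pvInner x v (pvInner x f (pvInner x c p))) ((0,0) : Int × Int)]
  rw [PySem.List.foldl_pyRange_zero_pyGetD c 0
        (fun p x => pvInner x v (pvInner x f p))]
  rw [PySem.List.foldl_pyRange_zero_pyGetD f 0
        (fun p x => pvInner x v p)]
  -- each loop body is additive in (FP, TN)
  have body3 : ∀ (Y Z W : List Int) (p : Int × Int) (x : Int),
      pvInner x W (pvInner x Z (pvInner x Y p))
        = (p.1 + (pvCnt x Y + pvCnt x Z + pvCnt x W),
           p.2 + (((Y.length : Int) + (Z.length : Int) + (W.length : Int))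
                   - (pvCnt x Y + pvCnt x Z + pvCnt x W))) := by
    intro Y Z W p x
    rw [pvInner_eq, pvInner_eq, pvInner_eq]
    dsimp
    simp only [Prod.mk.injEq]
    constructor <;> ring
  have body2 : ∀ (Z W : List Int) (p : Int × Int) (x : Int),
      pvInner x W (pvInner x Z p)
        = (p.1 + (pvCnt x Z + pvCnt x W),
           p.2 + (((Z.length : Int) + (W.length : Int)) - (pvCnt x Z + pvCnt x W))) := by
    intro Z W p x
    rw [pvInner_eq, pvInner_eq]
    dsimp
    simp only [Prod.mk.injEq]
    constructor <;> ring
  rw [show (fun (p : Int × Int) x => pvInner x v (pvInner x f (pvInner x c p)))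
      = (fun (p : Int × Int) x =>
          (p.1 + (pvCnt x c + pvCnt x f + pvCnt x v),
           p.2 + (((c.length : Int) + (f.length : Int) + (v.length : Int))
                   - (pvCnt x c + pvCnt x f + pvCnt x v)))) by
    funext p x; exact body3 c f v p x]
  rw [show (fun (p : Int × Int) x => pvInner x v (pvInner x f p))
      = (fun (p : Int × Int) x =>
          (p.1 + (pvCnt x f + pvCnt x v),
           p.2 + (((f.length : Int) + (v.length : Int)) - (pvCnt x f + pvCnt x v)))) by
    funext p x; exact body2 f v p x]
  rw [show (fun (p : Int × Int) x => pvInner x v p)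
      = (fun (p : Int × Int) x =>
          (p.1 + pvCnt x v, p.2 + ((v.length : Int) - pvCnt x v))) by
    funext p x; rw [pvInner_eq]]
  rw [pvFoldl_pair_add, pvFoldl_pair_add, pvFoldl_pair_add]
  -- B's crosses are the same per-list sums
  rw [pvCross_counter a c, pvCross_counter a f, pvCross_counter a v,
      pvCross_counter c f, pvCross_counter c v, pvCross_counter f v]
  -- split the sums and finish by arithmetic
  have split3 : ∀ (X : List Int) (g1 g2 g3 : Int → Int),
      (X.map (fun x => g1 x + g2 x + g3 x)).sum
        = (X.map g1).sum + (X.map g2).sum + (X.map g3).sum := by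
    intro X g1 g2 g3
    induction X with
    | nil => simp
    | cons x X ih => simp [ih]; ring
  have sumconst : ∀ (X : List Int) (kc : Int),
      (X.map (fun _ => kc)).sum = (X.length : Int) * kc := by
    intro X kc
    induction X with
    | nil => simp
    | cons x X ih => rw [List.map_cons, List.sum_cons, ih, List.length_cons]; push_cast; ring
  have tn1 : (a.map (fun x =>
        ((c.length : Int) + (f.length : Int) + (v.length : Int))
          - (pvCnt x c + pvCnt x f + pvCnt x v))).sum
      = (a.length : Int) * ((c.length : Int) + (f.length : Int) + (v.length : Int))
          - (a.map (fun x => pvCnt x c + pvCnt x f + pvCnt x v)).sum := by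
    rw [pvSum_map_sub, sumconst]
  have tn2 : (c.map (fun x =>
        ((f.length : Int) + (v.length : Int)) - (pvCnt x f + pvCnt x v))).sum
      = (c.length : Int) * ((f.length : Int) + (v.length : Int))
          - (c.map (fun x => pvCnt x f + pvCnt x v)).sum := by
    rw [pvSum_map_sub, sumconst]
  have tn3 : (f.map (fun x => (v.length : Int) - pvCnt x v)).sum
      = (f.length : Int) * (v.length : Int) - (f.map (fun x => pvCnt x v)).sum := by
    rw [pvSum_map_sub, sumconst]
  have split2 : ∀ (X : List Int) (g1 g2 : Int → Int),
      (X.map (fun x => g1 x + g2 x)).sum = (X.map g1).sum + (X.map g2).sum := by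
    intro X g1 g2
    induction X with
    | nil => simp
    | cons x X ih => simp [ih]; ring
  simp only [tn1, tn2, tn3, split3, split2, PySem.List.len]
  simp only [Prod.mk.injEq]
  constructor <;> ring
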